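-- pv_equiv track=rewrite | github.com/jhy-123/DLLM-AccelEval | src/models/eagle3/ea_model.py | _find_first_stop_match
-- ===== SOURCE A (Python) =====
-- def _find_first_stop_match(generated_ids, stop_token_ids):
--     earliest = None
--     for stop_ids in stop_token_ids or []:
--         if not stop_ids:
--             continue
--         stop_len = len(stop_ids)
--         limit = len(generated_ids) - stop_len + 1
--         for start in range(max(limit, 0)):
--             if generated_ids[start : start + stop_len] == stop_ids:
--                 if earliest is None or start < earliest:
--                     earliest = start
--                 break
--     return earliest
-- ===== SOURCE B (Python) =====
-- def _find_first_stop_match(generated_ids, stop_token_ids):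
--     stops = [s for s in (stop_token_ids or []) if s]
--     return next(
--         (start for start in range(len(generated_ids))
--          if any(generated_ids[start:start + len(s)] == s for s in stops)),
--         None,
--     )
-- ===== Notes on version B (the rewrite author's own statement) =====
-- stated objective: alternative
-- what changed: B transposes the loops: instead of A's per-stop-sequence first-match searches combined by a running minimum, B makes one left-to-right scan over start positions and returns the first position where any non-empty stop sequence matches, with no minimum accumulator.
import Mathlib
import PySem

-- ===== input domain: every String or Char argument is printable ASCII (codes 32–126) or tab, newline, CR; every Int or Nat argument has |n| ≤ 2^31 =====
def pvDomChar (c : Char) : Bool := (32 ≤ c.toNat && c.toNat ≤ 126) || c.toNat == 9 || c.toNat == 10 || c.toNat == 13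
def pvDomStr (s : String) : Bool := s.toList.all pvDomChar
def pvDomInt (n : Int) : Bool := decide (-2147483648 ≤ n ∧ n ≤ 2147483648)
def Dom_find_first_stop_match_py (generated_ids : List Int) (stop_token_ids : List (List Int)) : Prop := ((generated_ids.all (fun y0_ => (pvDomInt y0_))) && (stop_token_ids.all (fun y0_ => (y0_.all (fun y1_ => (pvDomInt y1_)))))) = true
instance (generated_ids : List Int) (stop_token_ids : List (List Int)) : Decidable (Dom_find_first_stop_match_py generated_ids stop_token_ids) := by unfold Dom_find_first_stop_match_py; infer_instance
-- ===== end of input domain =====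

-- B transposes the loops: one left-to-right scan over start positions, returning the first
-- position where any non-empty stop sequence matches, instead of A's per-sequence first-match
-- searches combined by a running minimum (objective: alternative traversal, no accumulator).

-- ===== PORT A =====
-- inner `for start in range(max(limit,0))` loop of A, with its break and earliest-update
def innerA (gen stop_ids : List Int) (L : Int) : Nat → Int → Option Int → Option Int
  | 0, _, earliest => earliest
  | r+1, start, earliest =>
    if PySem.List.slice gen (some start) (some (start + L)) == stop_ids then
      match earliest with
      | none => some start
      | some v => if start < v then some start else some v
    else innerA gen stop_ids L r (start + 1) earliest

def find_first_stop_match_py (generated_ids : List Int) (stop_token_ids : List (List Int)) : Option Int :=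
  stop_token_ids.foldl (fun earliest stop_ids =>
    if stop_ids.isEmpty then earliest
    else
      let L : Int := (stop_ids.length : Int)
      let limit : Int := (generated_ids.length : Int) - L + 1
      innerA generated_ids stop_ids L (max limit 0).toNat 0 earliest) none

-- ===== PORT B =====
def find_first_stop_match_py_alt (generated_ids : List Int) (stop_token_ids : List (List Int)) : Option Int :=
  let stops := stop_token_ids.filter (fun s => !s.isEmpty)
  ((List.range generated_ids.length).find? (fun (start : Nat) =>
      stops.any (fun s =>
        PySem.List.slice generated_ids (some (start : Int)) (some ((start : Int) + (s.length : Int))) == s))).map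
    (fun t => (t : Int))

-- ===== PRECONDITION & SPEC =====
def Spec_find_first_stop_match_py (generated_ids : List Int) (stop_token_ids : List (List Int)) (out : Option Int) : Prop := out = find_first_stop_match_py_alt generated_ids stop_token_ids
instance (generated_ids : List Int) (stop_token_ids : List (List Int)) (out : Option Int) : Decidable (Spec_find_first_stop_match_py generated_ids stop_token_ids out) := by unfold Spec_find_first_stop_match_py; infer_instance

-- ===== CLAIM (what is proved, stated in full; the proofs are below) =====
def Claim_equal_find_first_stop_match_py : Prop := ∀ (generated_ids : List Int) (stop_token_ids : List (List Int)), Dom_find_first_stop_match_py generated_ids stop_token_ids → Spec_find_first_stop_match_py generated_ids stop_token_ids (find_first_stop_match_py generated_ids stop_token_ids)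

-- ===== LEMMAS AND PROOFS =====

/-- does `s` match `gen` at position `t`? (the slice test both ports perform) -/
def matchAt (gen s : List Int) (t : Nat) : Bool :=
  PySem.List.slice gen (some (t : Int)) (some ((t : Int) + (s.length : Int))) == s

/-- min on `Option Nat`, `none` = +∞ -/
def moN : Option Nat → Option Nat → Option Nat
  | none, b => b
  | a, none => a
  | some x, some y => some (min x y)

/-- min on `Option Int`, `none` = +∞ -/
def moI : Option Int → Option Int → Option Int
  | none, b => b
  | a, none => a
  | some x, some y => some (min x y)

def castO (a : Option Nat) : Option Int := a.map (fun t => (t : Int))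

lemma castO_moN (a b : Option Nat) : castO (moN a b) = moI (castO a) (castO b) := by
  cases a <;> cases b <;> simp [castO, moN, moI, Nat.cast_min]

lemma moI_assoc (a b c : Option Int) : moI (moI a b) c = moI a (moI b c) := by
  cases a <;> cases b <;> cases c <;> simp [moI, min_assoc]

lemma innerA_eq (gen s : List Int) (r : Nat) :
    ∀ (start : Nat) (e : Option Int),
    innerA gen s (s.length : Int) r (start : Int) e
      = moI e (castO (((List.range' start r).find? (matchAt gen s)))) := by
  induction r with
  | zero => intro start e; cases e <;> rfl
  | succ r ih =>
    intro start e
    rw [List.range'_succ]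
    by_cases h : matchAt gen s start
    · rw [List.find?_cons_of_pos h]
      have h' : (PySem.List.slice gen (some (start : Int)) (some ((start : Int) + (s.length : Int))) == s) = true := h
      simp only [innerA, h', if_true]
      cases e with
      | none => rfl
      | some v =>
        show (if (start : Int) < v then some (start : Int) else some v) = some (min v (start : Int))
        split_ifs with hv <;> congr 1 <;> omega
    · rw [List.find?_cons_of_neg h]
      rw [Bool.not_eq_true] at h
      have h' : (PySem.List.slice gen (some (start : Int)) (some ((start : Int) + (s.length : Int))) == s) = false := h
      simp only [innerA, h', Bool.false_eq_true, if_false]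
      have hc : (start : Int) + 1 = ((start + 1 : Nat) : Int) := by push_cast; ring
      rw [hc, ih]

lemma matchAt_false_of_ge (gen s : List Int) (hs : s ≠ []) (t : Nat)
    (ht : (gen.length : Int) - (s.length : Int) + 1 ≤ (t : Int)) :
    matchAt gen s t = false := by
  unfold matchAt
  rw [PySem.List.slice_natCast_add]
  have hlen : ((gen.drop t).take s.length).length < s.length := by
    have h1 : 0 < s.length := List.length_pos_of_ne_nil hs
    simp [List.length_take, List.length_drop]
    omega
  rw [beq_eq_false_iff_ne]
  intro hEq
  rw [hEq] at hlen
  omega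

lemma find?_range_extend (p : Nat → Bool) (m n : Nat) (hmn : m ≤ n)
    (h : ∀ t, m ≤ t → p t = false) :
    (List.range n).find? p = (List.range m).find? p := by
  have : n = m + (n - m) := by omega
  rw [this, List.range_add, List.find?_append]
  have h2 : (List.map (m + ·) (List.range (n - m))).find? p = none := by
    rw [List.find?_eq_none]
    intro x hx
    simp only [List.mem_map, List.mem_range] at hx
    obtain ⟨y, _, rfl⟩ := hx
    simp [h (m + y) (by omega)]
  rw [h2, Option.or_none]

lemma find?_or (p q : Nat → Bool) :
    ∀ (l : List Nat), l.Pairwise (· < ·) →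
    l.find? (fun x => p x || q x) = moN (l.find? p) (l.find? q) := by
  intro l
  induction l with
  | nil => intro _; rfl
  | cons a t ih =>
    intro hp
    rw [List.pairwise_cons] at hp
    obtain ⟨ha, hpt⟩ := hp
    by_cases hpa : p a
    · by_cases hqa : q a
      · simp [hpa, hqa, moN]
      · rw [List.find?_cons_of_pos (by simp [hpa]), List.find?_cons_of_pos hpa,
          List.find?_cons_of_neg (by simp [hqa])]
        cases hq : t.find? q with
        | none => rfl
        | some b =>
          have hb : b ∈ t := List.mem_of_find?_eq_some hq
          have : a < b := ha b hb
          simp [moN, Nat.min_def]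
          omega
    · by_cases hqa : q a
      · rw [List.find?_cons_of_pos (by simp [hpa, hqa]), List.find?_cons_of_neg (by simp [hpa]),
          List.find?_cons_of_pos hqa]
        cases hq : t.find? p with
        | none => rfl
        | some b =>
          have hb : b ∈ t := List.mem_of_find?_eq_some hq
          have : a < b := ha b hb
          simp [moN, Nat.min_def]
          omega
      · rw [List.find?_cons_of_neg (by simp [hpa, hqa]), List.find?_cons_of_neg (by simp [hpa]),
          List.find?_cons_of_neg (by simp [hqa])]
        exact ih hpt

/-- A's fold over the stop sequences computes `moI e (first position where any kept sequence matches)`. -/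
lemma foldl_eq (gen : List Int) :
    ∀ (stops : List (List Int)) (e : Option Int),
    stops.foldl (fun earliest stop_ids =>
      if stop_ids.isEmpty then earliest
      else
        let L : Int := (stop_ids.length : Int)
        let limit : Int := (gen.length : Int) - L + 1
        innerA gen stop_ids L (max limit 0).toNat 0 earliest) e
      = moI e (castO ((List.range gen.length).find?
          (fun t => (stops.filter (fun s => !s.isEmpty)).any (fun s => matchAt gen s t)))) := by
  intro stops
  induction stops with
  | nil =>
    intro e
    have hnone : (List.range gen.length).find?
        (fun t => (([] : List (List Int)).filter (fun s => !s.isEmpty)).any (fun s => matchAt gen s t)) = none := by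
      rw [List.find?_eq_none]; intro x _; simp
    simp only [List.foldl_nil, hnone]
    cases e <;> rfl
  | cons s rest ih =>
    intro e
    by_cases hs : s.isEmpty
    · simp only [List.foldl_cons, if_pos hs]
      rw [ih]
      have hfil : (s :: rest).filter (fun s => !s.isEmpty) = rest.filter (fun s => !s.isEmpty) := by
        simp [hs]
      rw [hfil]
    · have hne : s ≠ [] := by simpa [List.isEmpty_iff] using hs
      have hL : 0 < s.length := List.length_pos_of_ne_nil hne
      simp only [List.foldl_cons, if_neg hs]
      rw [ih]
      have hm : (max ((gen.length : Int) - (s.length : Int) + 1) 0).toNat ≤ gen.length := by omega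
      have hinner :
          innerA gen s (s.length : Int) (max ((gen.length : Int) - (s.length : Int) + 1) 0).toNat 0 e
            = moI e (castO ((List.range gen.length).find? (matchAt gen s))) := by
        have h := innerA_eq gen s ((max ((gen.length : Int) - (s.length : Int) + 1) 0).toNat) 0 e
        simp only [Nat.cast_zero] at h
        rw [h, ← List.range_eq_range',
          find?_range_extend (matchAt gen s) _ gen.length hm
            (fun t ht => matchAt_false_of_ge gen s hne t (by omega))]
      rw [hinner]
      rw [moI_assoc]
      congr 1
      rw [← castO_moN]
      congr 1
      rw [← find?_or _ _ _ (List.pairwise_lt_range)]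
      congr 1
      funext t
      simp [hs]

-- ===== VERDICT (by name: the statement is the Claim_ definition above) =====
theorem find_first_stop_match_py_spec : Claim_equal_find_first_stop_match_py := by
  intro gen stops _
  unfold Spec_find_first_stop_match_py find_first_stop_match_py find_first_stop_match_py_alt
  rw [foldl_eq]
  simp only [moI]
  rfl
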